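-- pv_equiv track=rewrite | github.com/SeBin7/agentic-action | tools/bridge/promote_chain.py | checks_summary
-- ===== SOURCE A (Python) =====
-- from typing import Any, Dict, List, Optional
--
-- def checks_summary(pr: Dict[str, Any]) -> Dict[str, Any]:
--     rows = pr.get("statusCheckRollup") or []
--     if not rows:
--         return {"total": 0, "completed": 0, "success": 0, "pending": 0, "failed": 0}
--
--     total = len(rows)
--     completed = 0
--     success = 0
--     pending = 0
--     failed = 0
--
--     for row in rows:
--         status = str(row.get("status") or "").upper()
--         conclusion = str(row.get("conclusion") or "").upper()
--         if status == "COMPLETED":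
--             completed += 1
--             if conclusion in {"SUCCESS", "SKIPPED", "NEUTRAL"}:
--                 success += 1
--             else:
--                 failed += 1
--         else:
--             pending += 1
--
--     return {
--         "total": total,
--         "completed": completed,
--         "success": success,
--         "pending": pending,
--         "failed": failed,
--     }
-- ===== SOURCE B (Python) =====
-- def _classify(row):
--     if str(row.get("status") or "").upper() != "COMPLETED":
--         return "P"
--     if str(row.get("conclusion") or "").upper() in ("SUCCESS", "SKIPPED", "NEUTRAL"):
--         return "S"
--     return "F"
--
-- def checks_summary(pr):
--     labels = [_classify(row) for row in (pr.get("statusCheckRollup") or [])]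
--     s = labels.count("S")
--     f = labels.count("F")
--     p = labels.count("P")
--     return {
--         "total": s + f + p,
--         "completed": s + f,
--         "success": s,
--         "pending": p,
--         "failed": f,
--     }
-- ===== Notes on version B (the rewrite author's own statement) =====
-- stated objective: alternative
-- what changed: Replaces A's single pass maintaining four branching counters (with a special-cased empty guard) by a map-then-count design: each row is first mapped to one of three category labels ('S'/'F'/'P'), the label list is tallied with list.count, and total/completed are derived by arithmetic (total = s+f+p, completed = s+f); the empty case falls out naturally.
import Mathlib
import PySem

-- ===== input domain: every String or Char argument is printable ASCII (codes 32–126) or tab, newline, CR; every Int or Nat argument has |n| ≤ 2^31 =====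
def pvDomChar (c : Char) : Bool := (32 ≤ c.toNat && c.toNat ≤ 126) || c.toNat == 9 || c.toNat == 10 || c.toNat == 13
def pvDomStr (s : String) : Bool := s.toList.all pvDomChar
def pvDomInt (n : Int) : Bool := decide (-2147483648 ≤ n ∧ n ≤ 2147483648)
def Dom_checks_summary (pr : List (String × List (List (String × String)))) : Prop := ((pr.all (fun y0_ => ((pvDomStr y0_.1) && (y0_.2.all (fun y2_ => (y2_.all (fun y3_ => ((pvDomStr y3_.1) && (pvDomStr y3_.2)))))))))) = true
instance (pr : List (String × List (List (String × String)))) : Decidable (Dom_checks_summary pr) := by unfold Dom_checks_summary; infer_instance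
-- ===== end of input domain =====

-- B replaces A's four-counter branching loop (with its empty guard) by a map-then-count
-- design: classify each row to a label, tally the label list, derive total/completed by
-- arithmetic. Same O(n) cost, no speed claim.

-- dict.get on an association list: first match (both Pythons use it identically)
def pvGet? {α : Type} (d : List (String × α)) (k : String) : Option α :=
  match d with
  | [] => none
  | (k', v) :: rest => if k' == k then some v else pvGet? rest k

-- str(row.get(k) or "").upper()  (values are strings, so str() is identity and "" stays "")
def pvField (row : List (String × String)) (k : String) : String :=
  PySem.Str.upper ((pvGet? row k).getD "")

-- ===== PORT A =====
def checks_summary (pr : List (String × List (List (String × String)))) : List (String × Int) :=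
  let rows := (pvGet? pr "statusCheckRollup").getD []
  if rows.isEmpty then
    [("total", 0), ("completed", 0), ("success", 0), ("pending", 0), ("failed", 0)]
  else
    let total : Int := rows.length
    let st := rows.foldl (fun (acc : Int × Int × Int × Int) row =>
        let status := pvField row "status"
        let conclusion := pvField row "conclusion"
        if status == "COMPLETED" then
          if ["SUCCESS", "SKIPPED", "NEUTRAL"].contains conclusion then
            (acc.1 + 1, acc.2.1 + 1, acc.2.2.1, acc.2.2.2)
          else
            (acc.1 + 1, acc.2.1, acc.2.2.1, acc.2.2.2 + 1)
        else
          (acc.1, acc.2.1, acc.2.2.1 + 1, acc.2.2.2)) (0, 0, 0, 0)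
    [("total", total), ("completed", st.1), ("success", st.2.1),
     ("pending", st.2.2.1), ("failed", st.2.2.2)]

-- ===== PORT B =====
def pvClassify (row : List (String × String)) : String :=
  if pvField row "status" != "COMPLETED" then "P"
  else if ["SUCCESS", "SKIPPED", "NEUTRAL"].contains (pvField row "conclusion") then "S"
  else "F"

def checks_summary_alt (pr : List (String × List (List (String × String)))) : List (String × Int) :=
  let labels := ((pvGet? pr "statusCheckRollup").getD []).map pvClassify
  let s : Int := labels.count "S"
  let f : Int := labels.count "F"
  let p : Int := labels.count "P"
  [("total", s + f + p), ("completed", s + f), ("success", s),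
   ("pending", p), ("failed", f)]

-- ===== PRECONDITION & SPEC =====
def Spec_checks_summary (pr : List (String × List (List (String × String)))) (out : List (String × Int)) : Prop := out = checks_summary_alt pr
instance (pr : List (String × List (List (String × String)))) (out : List (String × Int)) : Decidable (Spec_checks_summary pr out) := by unfold Spec_checks_summary; infer_instance

-- ===== CLAIM (what is proved, stated in full; the proofs are below) =====
def Claim_equal_checks_summary : Prop := ∀ (pr : List (String × List (List (String × String)))), Dom_checks_summary pr → Spec_checks_summary pr (checks_summary pr)

-- ===== LEMMAS AND PROOFS =====

-- A's fold, from an arbitrary start state, adds exactly the label counts B computes.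
theorem foldA_char (rows : List (List (String × String))) (c s p f : Int) :
    rows.foldl (fun (acc : Int × Int × Int × Int) row =>
        let status := pvField row "status"
        let conclusion := pvField row "conclusion"
        if status == "COMPLETED" then
          if ["SUCCESS", "SKIPPED", "NEUTRAL"].contains conclusion then
            (acc.1 + 1, acc.2.1 + 1, acc.2.2.1, acc.2.2.2)
          else
            (acc.1 + 1, acc.2.1, acc.2.2.1, acc.2.2.2 + 1)
        else
          (acc.1, acc.2.1, acc.2.2.1 + 1, acc.2.2.2)) (c, s, p, f)
    = (c + (((rows.map pvClassify).count "S" : Int) + (rows.map pvClassify).count "F"),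
       s + ((rows.map pvClassify).count "S" : Int),
       p + ((rows.map pvClassify).count "P" : Int),
       f + ((rows.map pvClassify).count "F" : Int)) := by
  induction rows generalizing c s p f with
  | nil => simp
  | cons r rest ih =>
    rw [List.foldl_cons]
    by_cases hc : (pvField r "status" == "COMPLETED") = true
    · have hne : (pvField r "status" != "COMPLETED") = false := by
        simp [bne, hc]
      by_cases hs : ["SUCCESS", "SKIPPED", "NEUTRAL"].contains (pvField r "conclusion") = true
      · have hcl : pvClassify r = "S" := by
          simp only [pvClassify, hne, hs, Bool.false_eq_true, if_false, if_true]
        rw [if_pos hc, if_pos hs, ih]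
        simp only [List.map_cons, List.count_cons, hcl, Prod.mk.injEq]
        norm_num
        omega
      · have hcl : pvClassify r = "F" := by
          have hs' := Bool.eq_false_iff.mpr hs
          simp only [pvClassify, hne, hs', Bool.false_eq_true, if_false]
        rw [if_pos hc, if_neg hs, ih]
        simp only [List.map_cons, List.count_cons, hcl, Prod.mk.injEq]
        norm_num
        omega
    · have hne : (pvField r "status" != "COMPLETED") = true := by
        simp [bne]; exact fun h => hc (by simp [h])
      have hcl : pvClassify r = "P" := by simp only [pvClassify, hne, if_true]
      rw [if_neg hc, ih]
      simp only [List.map_cons, List.count_cons, hcl, Prod.mk.injEq]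
      norm_num
      omega

-- each row's label is one of the three, so the three counts sum to the length
theorem counts_len (rows : List (List (String × String))) :
    ((rows.map pvClassify).count "S" + (rows.map pvClassify).count "F"
      + (rows.map pvClassify).count "P") = rows.length := by
  induction rows with
  | nil => simp
  | cons r rest ih =>
    simp only [List.map_cons, List.count_cons, List.length_cons]
    by_cases hne : (pvField r "status" != "COMPLETED") = true
    · have : pvClassify r = "P" := by simp only [pvClassify, hne, if_true]
      simp [this]; omega
    · by_cases hs : ["SUCCESS", "SKIPPED", "NEUTRAL"].contains (pvField r "conclusion") = true
      · have hne' := Bool.eq_false_iff.mpr hne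
        have : pvClassify r = "S" := by
          simp only [pvClassify, hne', hs, Bool.false_eq_true, if_false, if_true]
        simp [this]; omega
      · have hne' := Bool.eq_false_iff.mpr hne
        have hs' := Bool.eq_false_iff.mpr hs
        have : pvClassify r = "F" := by
          simp only [pvClassify, hne', hs', Bool.false_eq_true, if_false]
        simp [this]; omega

-- ===== VERDICT (by name: the statement is the Claim_ definition above) =====
theorem checks_summary_spec : Claim_equal_checks_summary := by
  intro pr _
  show checks_summary pr = checks_summary_alt pr
  unfold checks_summary checks_summary_alt
  set rows := (pvGet? pr "statusCheckRollup").getD [] with hrows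
  by_cases h : rows.isEmpty
  · rw [if_pos h]
    rw [List.isEmpty_iff] at h
    simp [h]
  · rw [if_neg h]
    rw [foldA_char]
    have hlen := counts_len rows
    simp only [Prod.mk.injEq, List.cons.injEq, and_true, true_and]
    constructor
    · push_cast [← hlen]; ring
    · omega
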